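-- pv_equiv track=rewrite | github.com/subhambehera2104/programming | python/frequency.py | frequency_of_list
-- ===== SOURCE A (Python) =====
-- def frequency_of_list(num):
--     n= len(num)
--     frequency = [1]* n
--     for i in range(n):
--         if frequency[i]==-1:
--             continue
--         for j in range(i+1,n):
--             if num[i]==num[j]:
--                 frequency[i]+=1
--                 frequency[j]=-1
--     return frequency
-- ===== SOURCE B (Python) =====
-- def frequency_of_list(num):
--     n = len(num)
--     result = [1] * n
--     firsts = []  # indices of first occurrences seen so far
--     for i in range(n):
--         for idx in firsts:
--             if num[idx] == num[i]:
--                 result[i] = -1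
--                 result[idx] += 1
--                 break
--         else:
--             firsts.append(i)
--     return result
-- ===== Notes on version B (the rewrite author's own statement) =====
-- stated objective: alternative
-- what changed: Inverts A's forward propagation (each first occurrence scans the whole suffix, incrementing itself and marking later duplicates) into backward accumulation: one forward pass that scans a maintained table of first-occurrence indices; a duplicate marks itself -1 and increments its first occurrence's running count.
import Mathlib
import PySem

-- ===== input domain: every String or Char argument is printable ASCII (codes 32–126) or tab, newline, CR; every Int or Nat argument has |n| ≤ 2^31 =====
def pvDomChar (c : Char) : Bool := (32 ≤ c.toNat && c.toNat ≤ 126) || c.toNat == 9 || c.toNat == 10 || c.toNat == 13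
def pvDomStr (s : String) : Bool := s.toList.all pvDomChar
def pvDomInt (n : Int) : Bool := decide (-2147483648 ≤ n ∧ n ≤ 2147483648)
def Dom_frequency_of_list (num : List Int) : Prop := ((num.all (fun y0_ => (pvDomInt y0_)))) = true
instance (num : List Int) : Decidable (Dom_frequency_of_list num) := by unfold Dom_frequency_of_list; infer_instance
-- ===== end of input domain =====

-- B replaces A's forward propagation (each first occurrence scans the suffix, marking
-- later duplicates) by backward accumulation (one pass; each duplicate increments the
-- running count of its first occurrence, found in a maintained table of first indices).

-- ===== PORT A =====
-- literal port of A: outer loop over i, skip if already -1, inner suffix scan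
def frequency_of_list (num : List Int) : List Int :=
  (List.range num.length).foldl
    (fun freq i =>
      if freq.getD i 0 == -1 then freq
      else
        (List.range' (i + 1) (num.length - (i + 1))).foldl
          (fun f j =>
            if num.getD i 0 == num.getD j 0 then
              (f.set i (f.getD i 0 + 1)).set j (-1)
            else f)
          freq)
    (List.replicate num.length 1)

-- ===== PORT B =====
-- literal port of Source B: one pass, inner scan (find?) over the table of first-occurrence indices
def frequency_of_list_alt (num : List Int) : List Int :=
  ((List.range num.length).foldl
    (fun st i =>
      match st.2.find? (fun idx => num.getD idx 0 == num.getD i 0) with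
      | some idx =>
          let r := st.1.set i (-1)
          (r.set idx (r.getD idx 0 + 1), st.2)
      | none => (st.1, st.2 ++ [i]))
    (List.replicate num.length 1, ([] : List Nat))).1

-- ===== PRECONDITION & SPEC =====
def Spec_frequency_of_list (num : List Int) (out : List Int) : Prop := out = frequency_of_list_alt num
instance (num : List Int) (out : List Int) : Decidable (Spec_frequency_of_list num out) := by unfold Spec_frequency_of_list; infer_instance

-- ===== CLAIM (what is proved, stated in full; the proofs are below) =====
def Claim_equal_frequency_of_list : Prop := ∀ (num : List Int), Dom_frequency_of_list num → Spec_frequency_of_list num (frequency_of_list num)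

-- ===== LEMMAS AND PROOFS =====

def gD (num : List Int) (p : Nat) : Int := num.getD p 0
def dupB (num : List Int) (p : Nat) : Bool := (List.range p).any (fun t => gD num t == gD num p)
def cntAfter (num : List Int) (p : Nat) : Nat :=
  (List.range' (p + 1) (num.length - (p + 1))).countP (fun j => gD num p == gD num j)
def specF (num : List Int) (p : Nat) : Int := if dupB num p then -1 else 1 + (cntAfter num p : Int)
def FA (num : List Int) (k p : Nat) : Int :=
  if p < k then specF num p
  else if (List.range k).any (fun t => gD num t == gD num p) then -1 else 1
def cntPre (num : List Int) (k p : Nat) : Nat := (List.range k).countP (fun t => gD num t == gD num p)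
def RB (num : List Int) (k p : Nat) : Int :=
  if p < k then (if dupB num p then -1 else (cntPre num k p : Int)) else 1

lemma range_split (p n : Nat) (h : p < n) :
    List.range n = List.range p ++ p :: List.range' (p + 1) (n - (p + 1)) := by
  have h1 : p + (n - p) = n := by omega
  rw [List.range_eq_range']
  rw [← h1, ← List.range'_append (s := 0) (m := p) (n := n - p) (step := 1)]
  have h2 : n - p = (n - (p+1)) + 1 := by omega
  rw [h2, List.range'_succ]
  have h3 : p + (n - (p + 1) + 1) - (p + 1) = n - (p+1) := by omega
  simp [List.range_eq_range', h3]

lemma cntPre_of_not_dup (num : List Int) (p : Nat) (hp : p < num.length)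
    (hd : dupB num p = false) : cntPre num num.length p = 1 + cntAfter num p := by
  unfold cntPre cntAfter
  rw [range_split p num.length hp, List.countP_append, List.countP_cons]
  have hz : (List.range p).countP (fun t => gD num t == gD num p) = 0 := by
    rw [List.countP_eq_zero]
    intro t ht
    exact List.any_eq_false.mp hd t ht
  have hcongr : (List.range' (p + 1) (num.length - (p + 1))).countP (fun t => gD num t == gD num p)
      = (List.range' (p + 1) (num.length - (p + 1))).countP (fun j => gD num p == gD num j) := by
    apply List.countP_congr
    intro a _
    simp only [beq_iff_eq]
    exact eq_comm
  rw [hcongr, hz]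
  simp
  omega

lemma final_bridge (num : List Int) (p : Nat) (hp : p < num.length) :
    RB num num.length p = FA num num.length p := by
  unfold RB FA specF
  rw [if_pos hp, if_pos hp]
  by_cases hd : dupB num p
  · simp [hd]
  · rw [if_neg (by simp [hd]), if_neg (by simp [hd]),
      cntPre_of_not_dup num p hp (by simpa using hd)]
    push_cast
    ring
def GA (num : List Int) (k m p : Nat) : Int :=
  if p = k then 1 + (((List.range' (k + 1) (m - (k + 1))).countP (fun j => gD num k == gD num j) : Nat) : Int)
  else if k + 1 ≤ p ∧ p < m ∧ gD num k = gD num p then -1 else FA num k p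

lemma map_range_set (n i : Nat) (h : i < n) (f : Nat → Int) (v : Int) :
    ((List.range n).map f).set i v = (List.range n).map (fun p => if p = i then v else f p) := by
  apply List.ext_getElem
  · simp
  · intro p h1 h2
    simp only [List.getElem_set, List.getElem_map, List.getElem_range]
    by_cases h3 : i = p
    · simp [h3]
    · simp [h3, Ne.symm h3]

lemma getD_map_range (n i : Nat) (h : i < n) (f : Nat → Int) :
    ((List.range n).map f).getD i 0 = f i := by
  rw [List.getD_eq_getElem?_getD]
  simp [List.getElem?_map, List.getElem?_range, h]

lemma innerA (num : List Int) (k : Nat) (hk : k < num.length) :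
    ∀ (l m : Nat), m + l = num.length → k + 1 ≤ m →
      (List.range' m l).foldl
        (fun f j => if num.getD k 0 == num.getD j 0 then (f.set k (f.getD k 0 + 1)).set j (-1) else f)
        ((List.range num.length).map (GA num k m))
      = (List.range num.length).map (GA num k num.length) := by
  intro l
  induction l with
  | zero =>
    intro m hm _
    have : m = num.length := by omega
    subst this
    simp
  | succ l ih =>
    intro m hm hkm
    have hmn : m < num.length := by omega
    have hkm' : k < m := by omega
    rw [List.range'_succ, List.foldl_cons]
    have hstep :
        (if num.getD k 0 == num.getD m 0 then
          ((((List.range num.length).map (GA num k m)).set k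
              (((List.range num.length).map (GA num k m)).getD k 0 + 1)).set m (-1))
         else ((List.range num.length).map (GA num k m)))
        = (List.range num.length).map (GA num k (m + 1)) := by
      by_cases he : gD num k = gD num m
      · rw [if_pos (by simpa [gD] using he)]
        rw [getD_map_range _ _ hk, map_range_set _ _ hk, map_range_set _ _ hmn]
        apply List.map_congr_left
        intro p hp
        by_cases hpm : p = m
        · subst hpm
          rw [if_pos rfl]
          rw [GA, if_neg (by omega), if_pos ⟨hkm, by omega, he⟩]
        · rw [if_neg hpm]
          by_cases hpk : p = k
          · rw [if_pos hpk, hpk, GA, GA, if_pos rfl, if_pos rfl]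
            have h1 : m + 1 - (k + 1) = (m - (k + 1)) + 1 := by omega
            rw [h1, List.range'_concat]
            have h2 : k + 1 + 1 * (m - (k + 1)) = m := by omega
            rw [h2, List.countP_append]
            simp [he]
            ring
          · rw [if_neg hpk, GA, GA, if_neg hpk, if_neg hpk]
            have : (k + 1 ≤ p ∧ p < m + 1 ∧ gD num k = gD num p)
                ↔ (k + 1 ≤ p ∧ p < m ∧ gD num k = gD num p) := by
              constructor
              · rintro ⟨a, b, c⟩; exact ⟨a, by omega, c⟩
              · rintro ⟨a, b, c⟩; exact ⟨a, by omega, c⟩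
            rw [if_congr this rfl rfl]
      · rw [if_neg (by simpa [gD] using he)]
        apply List.map_congr_left
        intro p hp
        by_cases hpk : p = k
        · rw [hpk, GA, GA, if_pos rfl, if_pos rfl]
          have h1 : m + 1 - (k + 1) = (m - (k + 1)) + 1 := by omega
          rw [h1, List.range'_concat]
          have h2 : k + 1 + 1 * (m - (k + 1)) = m := by omega
          rw [h2, List.countP_append]
          simp [he]
        · by_cases hpm : p = m
          · subst hpm
            rw [GA, GA, if_neg hpk, if_neg hpk, if_neg (by omega),
              if_neg (fun h => he h.2.2)]
          · rw [GA, GA, if_neg hpk, if_neg hpk]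
            have : (k + 1 ≤ p ∧ p < m + 1 ∧ gD num k = gD num p)
                ↔ (k + 1 ≤ p ∧ p < m ∧ gD num k = gD num p) := by
              constructor
              · rintro ⟨a, b, c⟩; exact ⟨a, by omega, c⟩
              · rintro ⟨a, b, c⟩; exact ⟨a, by omega, c⟩
            rw [if_congr this rfl rfl]
    rw [hstep]
    exact ih (m + 1) (by omega) (by omega)
lemma replicate_eq_map (n : Nat) : List.replicate n (1 : Int) = (List.range n).map (fun _ => 1) := by
  simp [List.map_const']

lemma any_range_succ (num : List Int) (k p : Nat) :
    (List.range (k+1)).any (fun t => gD num t == gD num p)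
      = ((List.range k).any (fun t => gD num t == gD num p) || (gD num k == gD num p)) := by
  rw [List.range_succ, List.any_append]
  simp

lemma outerA (num : List Int) :
    ∀ (k : Nat), k ≤ num.length →
      (List.range k).foldl
        (fun freq i =>
          if freq.getD i 0 == -1 then freq
          else (List.range' (i + 1) (num.length - (i + 1))).foldl
            (fun f j => if num.getD i 0 == num.getD j 0 then (f.set i (f.getD i 0 + 1)).set j (-1) else f)
            freq)
        (List.replicate num.length 1)
      = (List.range num.length).map (FA num k) := by
  intro k
  induction k with
  | zero =>
    intro _
    rw [replicate_eq_map]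
    simp only [List.range_zero, List.foldl_nil]
    apply List.map_congr_left
    intro p _
    rw [FA, if_neg (by omega)]
    simp
  | succ k ih =>
    intro hk1
    have hk : k < num.length := by omega
    rw [List.range_succ, List.foldl_append, ih (by omega), List.foldl_cons, List.foldl_nil]
    have hgetk : ((List.range num.length).map (FA num k)).getD k 0 = FA num k k :=
      getD_map_range _ _ hk _
    have hFAkk : FA num k k = if dupB num k then -1 else 1 := by
      rw [FA, if_neg (by omega)]
      rfl
    by_cases hd : dupB num k
    · -- already marked a duplicate: the whole iteration is skipped
      rw [hgetk, hFAkk, if_pos hd, if_pos (by decide)]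
      apply List.map_congr_left
      intro p hp
      by_cases hpk : p = k
      · rw [hpk, hFAkk, if_pos hd, FA, if_pos (by omega), specF, if_pos hd]
      · by_cases hplt : p < k
        · rw [FA, FA, if_pos hplt, if_pos (by omega)]
        · have hpgt : k + 1 ≤ p := by omega
          have e1 : FA num k p
              = if (List.range k).any (fun t => gD num t == gD num p) then -1 else 1 := by
            rw [FA, if_neg (by omega)]
          have e2 : FA num (k + 1) p
              = if (List.range (k + 1)).any (fun t => gD num t == gD num p) then -1 else 1 := by
            rw [FA, if_neg (by omega)]
          rw [e1, e2, any_range_succ]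
          by_cases h1 : (List.range k).any (fun t => gD num t == gD num p) = true
          · simp [h1]
          · have hbe : (gD num k == gD num p) = false := by
              simp only [beq_eq_false_iff_ne, ne_eq]
              intro h2
              obtain ⟨t, ht, hteq⟩ := List.any_eq_true.mp hd
              exact h1 (List.any_eq_true.mpr ⟨t, ht, by
                rw [beq_iff_eq] at hteq ⊢
                rw [hteq, h2]⟩)
            simp only [Bool.not_eq_true] at h1
            rw [h1, hbe]
            simp
    · -- k is a first occurrence: run the inner suffix scan
      rw [hgetk, hFAkk, if_neg hd, if_neg (by decide)]
      have hstart : (List.range num.length).map (FA num k)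
          = (List.range num.length).map (GA num k (k + 1)) := by
        apply List.map_congr_left
        intro p _
        by_cases hpk : p = k
        · rw [hpk, hFAkk, if_neg hd, GA, if_pos rfl]
          simp
        · rw [GA, if_neg hpk, if_neg (by rintro ⟨a, b, _⟩; omega)]
      rw [hstart, innerA num k hk (num.length - (k + 1)) (k + 1) (by omega) le_rfl]
      apply List.map_congr_left
      intro p hp
      have hpn : p < num.length := List.mem_range.mp hp
      by_cases hpk : p = k
      · rw [hpk, GA, if_pos rfl, FA, if_pos (by omega), specF, if_neg hd]
        rfl
      · by_cases hplt : p < k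
        · rw [GA, if_neg hpk, if_neg (by rintro ⟨a, _, _⟩; omega), FA, FA,
            if_pos hplt, if_pos (by omega)]
        · have hpgt : k + 1 ≤ p := by omega
          have e1 : FA num k p
              = if (List.range k).any (fun t => gD num t == gD num p) then -1 else 1 := by
            rw [FA, if_neg (by omega)]
          have e2 : FA num (k + 1) p
              = if (List.range (k + 1)).any (fun t => gD num t == gD num p) then -1 else 1 := by
            rw [FA, if_neg (by omega)]
          rw [GA, if_neg hpk, e1, e2, any_range_succ]
          by_cases he : gD num k = gD num p
          · rw [if_pos ⟨hpgt, hpn, he⟩, if_pos (by simp [he])]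
          · rw [if_neg (fun h => he h.2.2)]
            by_cases h1 : (List.range k).any (fun t => gD num t == gD num p) = true
            · rw [h1]
              simp
            · simp only [Bool.not_eq_true] at h1
              rw [h1]
              have hbe : (gD num k == gD num p) = false := by
                simp [he]
              rw [hbe]
              simp
def firstsF (num : List Int) (k : Nat) : List Nat := (List.range k).filter (fun p => !dupB num p)

lemma find?_unique {l : List Nat} {q : Nat → Bool} {t0 : Nat}
    (h0 : t0 ∈ l) (hq : q t0 = true) (hu : ∀ x ∈ l, q x = true → x = t0) :
    l.find? q = some t0 := by
  induction l with
  | nil => cases h0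
  | cons a l ih =>
    by_cases ha : q a = true
    · have : a = t0 := hu a (by simp) ha
      rw [List.find?_cons_of_pos ha, this]
    · rw [List.find?_cons_of_neg (by simp [ha])]
      have ht : t0 ∈ l := by
        rcases h0 with _ | h0
        · exact absurd hq ha
        · assumption
      exact ih ht (fun x hx hqx => hu x (by simp [hx]) hqx)

lemma cntPre_succ (num : List Int) (k p : Nat) :
    cntPre num (k + 1) p = cntPre num k p + (if gD num k = gD num p then 1 else 0) := by
  unfold cntPre
  rw [List.range_succ, List.countP_append]
  by_cases h : gD num k = gD num p <;> simp [h]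

lemma RB_lt (num : List Int) (k p : Nat) (h : p < k) :
    RB num k p = if dupB num p then -1 else (cntPre num k p : Int) := by
  rw [RB, if_pos h]

lemma RB_ge (num : List Int) (k p : Nat) (h : ¬ p < k) : RB num k p = 1 := by
  rw [RB, if_neg h]

lemma outerB (num : List Int) :
    ∀ (k : Nat), k ≤ num.length →
      (List.range k).foldl
        (fun st i =>
          match st.2.find? (fun idx => num.getD idx 0 == num.getD i 0) with
          | some idx =>
              let r := st.1.set i (-1)
              (r.set idx (r.getD idx 0 + 1), st.2)
          | none => (st.1, st.2 ++ [i]))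
        (List.replicate num.length 1, ([] : List Nat))
      = ((List.range num.length).map (RB num k), firstsF num k) := by
  intro k
  induction k with
  | zero =>
    intro _
    simp only [List.range_zero, List.foldl_nil, firstsF, List.filter_nil]
    rw [replicate_eq_map]
    refine Prod.ext ?_ rfl
    apply List.map_congr_left
    intro p _
    rw [RB_ge _ _ _ (by omega)]
  | succ k ih =>
    intro hk1
    have hk : k < num.length := by omega
    rw [List.range_succ, List.foldl_append, ih (by omega), List.foldl_cons, List.foldl_nil]
    by_cases hd : dupB num k
    · -- duplicate: the first occurrence t0 is found in the table
      have hex : ∃ t, gD num t = gD num k ∧ t < k := by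
        obtain ⟨t, ht, hteq⟩ := List.any_eq_true.mp hd
        exact ⟨t, beq_iff_eq.mp hteq, List.mem_range.mp ht⟩
      obtain ⟨t0, ht0eq, ht0lt, ht0min⟩ :
          ∃ t0, gD num t0 = gD num k ∧ t0 < k ∧ ∀ s, s < t0 → gD num s ≠ gD num k :=
        ⟨Nat.find hex, (Nat.find_spec hex).1, (Nat.find_spec hex).2,
          fun s hs hse => Nat.find_min hex hs ⟨hse, hs.trans (Nat.find_spec hex).2⟩⟩
      have ht0n : t0 < num.length := by omega
      have ht0nd : dupB num t0 = false :=
        List.any_eq_false.mpr (fun s hs => by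
          simp only [Bool.not_eq_true, beq_eq_false_iff_ne, ne_eq]
          intro hse
          exact ht0min s (List.mem_range.mp hs) (hse.trans ht0eq))
      have ht0mem : t0 ∈ firstsF num k :=
        List.mem_filter.mpr ⟨List.mem_range.mpr ht0lt, by simp [ht0nd]⟩
      have huniq : ∀ x ∈ firstsF num k,
          (num.getD x 0 == num.getD k 0) = true → x = t0 := by
        intro x hx hqx
        obtain ⟨hxr, hxnd⟩ := List.mem_filter.mp hx
        have hxk : x < k := List.mem_range.mp hxr
        have hxeq : gD num x = gD num k := beq_iff_eq.mp hqx
        have hle : t0 ≤ x := by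
          by_contra hgt
          exact ht0min x (by omega) hxeq
        rcases Nat.lt_or_ge t0 x with hlt | hge
        · exfalso
          have : dupB num x = true :=
            List.any_eq_true.mpr ⟨t0, List.mem_range.mpr hlt, by
              rw [beq_iff_eq, ht0eq, hxeq]⟩
          simp [this] at hxnd
        · omega
      have hfind : (firstsF num k).find? (fun idx => num.getD idx 0 == num.getD k 0)
          = some t0 :=
        find?_unique ht0mem (by rw [beq_iff_eq]; exact ht0eq) huniq
      simp only [hfind]
      refine Prod.ext ?_ ?_
      · -- result component
        simp only
        rw [map_range_set _ _ hk, getD_map_range _ _ ht0n, map_range_set _ _ ht0n]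
        apply List.map_congr_left
        intro p hp
        have hpn : p < num.length := List.mem_range.mp hp
        by_cases hpt0 : p = t0
        · rw [if_pos hpt0, hpt0, if_neg (show ¬ t0 = k by omega),
            RB_lt _ _ _ ht0lt, RB_lt _ _ _ (show t0 < k + 1 by omega),
            if_neg (by simp [ht0nd]), if_neg (by simp [ht0nd]),
            cntPre_succ, if_pos ht0eq.symm]
          push_cast
          ring
        · rw [if_neg hpt0]
          by_cases hpk : p = k
          · rw [if_pos hpk, hpk, RB_lt _ _ _ (by omega), if_pos hd]
          · rw [if_neg hpk]
            by_cases hplt : p < k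
            · rw [RB_lt _ _ _ hplt, RB_lt _ _ _ (by omega)]
              by_cases hdp : dupB num p
              · rw [if_pos hdp, if_pos hdp]
              · rw [if_neg hdp, if_neg hdp, cntPre_succ, if_neg (by
                  intro he
                  exact hpt0 (huniq p (List.mem_filter.mpr
                    ⟨List.mem_range.mpr hplt, by simp [hdp]⟩)
                    (by rw [beq_iff_eq]; exact he.symm)))]
                simp
            · rw [RB_ge _ _ _ hplt, RB_ge _ _ _ (by omega)]
      · -- table component: unchanged
        simp only [firstsF, List.range_succ, List.filter_append, List.filter_singleton]
        simp [hd]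
    · -- first occurrence: not found, appended to the table
      have hd' : dupB num k = false := by simpa using hd
      have hfind : (firstsF num k).find? (fun idx => num.getD idx 0 == num.getD k 0)
          = none := by
        rw [List.find?_eq_none]
        intro x hx
        obtain ⟨hxr, _⟩ := List.mem_filter.mp hx
        have hxk : x < k := List.mem_range.mp hxr
        simp only [Bool.not_eq_true, beq_eq_false_iff_ne, ne_eq]
        intro hxe
        have : dupB num k = true :=
          List.any_eq_true.mpr ⟨x, List.mem_range.mpr hxk, by rw [beq_iff_eq]; exact hxe⟩
        simp [this] at hd
      simp only [hfind]
      refine Prod.ext ?_ ?_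
      · simp only
        apply List.map_congr_left
        intro p hp
        have hpn : p < num.length := List.mem_range.mp hp
        by_cases hpk : p = k
        · rw [hpk, RB_ge _ _ _ (by omega), RB_lt _ _ _ (by omega), if_neg (by simp [hd']),
            cntPre_succ, if_pos rfl]
          have hz : cntPre num k k = 0 := by
            rw [cntPre, List.countP_eq_zero]
            intro t ht
            exact List.any_eq_false.mp hd' t ht
          rw [hz]
          simp
        · by_cases hplt : p < k
          · rw [RB_lt _ _ _ hplt, RB_lt _ _ _ (by omega)]
            by_cases hdp : dupB num p
            · rw [if_pos hdp, if_pos hdp]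
            · rw [if_neg hdp, if_neg hdp, cntPre_succ, if_neg (by
                intro he
                have : dupB num k = true :=
                  List.any_eq_true.mpr ⟨p, List.mem_range.mpr hplt,
                    by rw [beq_iff_eq]; exact he.symm⟩
                simp [this] at hd)]
              simp
          · rw [RB_ge _ _ _ hplt, RB_ge _ _ _ (by omega)]
      · simp only [firstsF, List.range_succ, List.filter_append, List.filter_singleton]
        simp [hd']

-- ===== VERDICT (by name: the statement is the Claim_ definition above) =====
theorem frequency_of_list_spec : Claim_equal_frequency_of_list := by
  intro num _
  unfold Spec_frequency_of_list frequency_of_list frequency_of_list_alt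
  rw [outerA num num.length le_rfl, outerB num num.length le_rfl]
  exact List.map_congr_left (fun p hp => (final_bridge num p (List.mem_range.mp hp)).symm)
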